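-- pv_equiv track=rewrite | github.com/TimS-ml/My-Algo | Templates/graph-bfs.py | graph_depth
-- ===== SOURCE A (Python) =====
-- from collections import defaultdict
--
-- def graph_depth(routes, S, T):
--     # routes[i][j] might not be unique?
--     stopInfo = defaultdict(set)
--     for busId, route in enumerate(routes):
--         for stop in route:
--             stopInfo[stop].add(busId)
--
--     # dijkstra way of writing bfs...
--     # unable to track level length, so need additional val to track depth
--     queue = [(S, 0)]
--     seen = set([S])
--     for stop, bus in queue:
--         if stop == T: return bus
--         for busId in stopInfo[stop]:
--             for transStop in routes[busId]:
--                 if transStop not in seen: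
--                     queue.append((transStop, bus + 1))
--                     seen.add(transStop)
--             routes[busId] = []  # seen route
--
--     return -1
-- ===== SOURCE B (Python) =====
-- def graph_depth(routes, S, T):
--     # Fixpoint set-saturation: reach = stops reachable with <= k buses; grow by
--     # unioning every route that intersects reach until T is covered or reach stops
--     # growing.  No queue, no stop->bus index, no visited marking; routes untouched
--     # (A clears routes[busId] in place; the return value is identical).
--     reach = {S}
--     k = 0
--     while True:
--         if T in reach:
--             return k
--         grown = set(reach)
--         for route in routes:
--             if not reach.isdisjoint(route):
--                 grown.update(route)
--         if len(grown) == len(reach):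
--             return -1
--         reach = grown
--         k += 1
-- ===== Notes on version B (the rewrite author's own statement) =====
-- stated objective: alternative
-- what changed: Replaces A's BFS (stop->bus inverted index, FIFO queue of depth-tagged stops, per-stop seen set, in-place clearing of expanded routes) by a round-based fixpoint saturation: keep one set of reachable stops and repeatedly union in every route that intersects it until T is covered or the set stops growing; no index, no queue, and routes is never mutated.
import Mathlib
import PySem

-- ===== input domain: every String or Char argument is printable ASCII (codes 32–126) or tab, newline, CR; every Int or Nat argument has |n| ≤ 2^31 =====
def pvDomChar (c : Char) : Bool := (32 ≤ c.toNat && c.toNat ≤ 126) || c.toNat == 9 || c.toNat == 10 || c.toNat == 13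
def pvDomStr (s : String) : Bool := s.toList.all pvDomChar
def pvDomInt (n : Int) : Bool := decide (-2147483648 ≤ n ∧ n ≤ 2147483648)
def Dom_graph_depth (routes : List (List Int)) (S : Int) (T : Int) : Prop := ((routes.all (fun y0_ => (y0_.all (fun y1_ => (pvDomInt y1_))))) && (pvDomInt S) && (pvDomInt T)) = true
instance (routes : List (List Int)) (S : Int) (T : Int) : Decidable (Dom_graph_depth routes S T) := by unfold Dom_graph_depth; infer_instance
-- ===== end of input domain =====

-- B replaces A's BFS (stop->bus index, FIFO queue of depth-tagged stops, seen set,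
-- in-place clearing of expanded routes) by a round-based fixpoint saturation: one
-- set of reachable stops, repeatedly unioned with every route that intersects it.
-- Side effect note: Python A clears routes[busId] in place, Python B never mutates
-- routes — the equivalence proved here is about the return value only.

-- ===== PORT A =====
-- stopInfo construction (stop -> set of bus ids); the bus-id sets are only folded
-- over where the result is order-independent.
def pvStopInfo (routes : List (List Int)) : PySem.Dict Int (PySem.Set Nat) :=
  routes.zipIdx.foldl
    (fun d p =>
      p.1.foldl (fun d stop => d.modify stop PySem.Set.empty (fun s => PySem.Set.add s p.2)) d)
    PySem.Dict.empty

-- the innermost loop of A: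
-- for transStop in <route>: if transStop not in seen: append it; seen.add(transStop)
def pvCollect : List Int → List Int → PySem.Set Int → List Int × PySem.Set Int
  | [], acc, seen => (acc, seen)
  | t :: ts, acc, seen =>
    if PySem.Set.contains seen t then pvCollect ts acc seen
    else pvCollect ts (acc ++ [t]) (PySem.Set.add seen t)

-- fuel: 1 + total number of stop entries bounds the number of dequeue steps of A's
-- queue loop (each enqueued stop is fresh); also bounds B's growth rounds.
def pvFuel (routes : List (List Int)) : Nat :=
  routes.foldl (fun a r => a + r.length) 0 + 1

-- one iteration of A's bus loop: collect unseen stops of rts[busId], then clear it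
def pvStepA (q : List Int × PySem.Set Int × List (List Int)) (busId : Nat) :
    List Int × PySem.Set Int × List (List Int) :=
  let c := pvCollect (q.2.2.getD busId []) q.1 q.2.1
  (c.1, c.2, q.2.2.set busId [])

-- A's loop: FIFO queue of (stop, depth) pairs; expanding a stop clears routes[busId]
def pvALoop (info : PySem.Dict Int (PySem.Set Nat)) (T : Int) :
    Nat → List (Int × Int) → PySem.Set Int → List (List Int) → Int
  | _, [], _, _ => -1
  | 0, _ :: _, _, _ => -1
  | fuel + 1, (stop, bus) :: rest, seen, rts =>
    if stop = T then bus
    else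
      let st := (info.getD stop PySem.Set.empty).foldl pvStepA ([], seen, rts)
      pvALoop info T fuel (rest ++ st.1.map (fun s => (s, bus + 1))) st.2.1 st.2.2

def graph_depth (routes : List (List Int)) (S : Int) (T : Int) : Int :=
  pvALoop (pvStopInfo routes) T (pvFuel routes) [(S, 0)] (PySem.Set.ofList [S]) routes

-- ===== PORT B =====
-- one growth round of B: union into grown every route intersecting reach
def pvGrow (routes : List (List Int)) (reach : PySem.Set Int) : PySem.Set Int :=
  routes.foldl
    (fun g route => if !(PySem.Set.isdisjoint reach route) then PySem.Set.update g route else g)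
    reach

-- B's 'while True' loop (fuel only makes the recursion structural; with the fuel
-- graph_depth_alt supplies, the 0 case is never reached — proved below)
def pvSat (routes : List (List Int)) (T : Int) : Nat → PySem.Set Int → Int → Int
  | 0, _, _ => -1
  | fS + 1, reach, k =>
    if PySem.Set.contains reach T then k
    else
      let grown := pvGrow routes reach
      if PySem.Set.len grown = PySem.Set.len reach then -1
      else pvSat routes T fS grown (k + 1)

def graph_depth_alt (routes : List (List Int)) (S : Int) (T : Int) : Int :=
  pvSat routes T (pvFuel routes) (PySem.Set.ofList [S]) 0

-- ===== PRECONDITION & SPEC =====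
def Spec_graph_depth (routes : List (List Int)) (S : Int) (T : Int) (out : Int) : Prop := out = graph_depth_alt routes S T
instance (routes : List (List Int)) (S : Int) (T : Int) (out : Int) : Decidable (Spec_graph_depth routes S T out) := by unfold Spec_graph_depth; infer_instance

-- ===== CLAIM (what is proved, stated in full; the proofs are below) =====
def Claim_equal_graph_depth : Prop := ∀ (routes : List (List Int)) (S : Int) (T : Int), Dom_graph_depth routes S T → Spec_graph_depth routes S T (graph_depth routes S T)

-- ===== LEMMAS AND PROOFS =====

-- proof-only intermediate: a level-order BFS bridging A's queue and B's saturation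
def pvStepB (routes : List (List Int)) (q : List Int × PySem.Set Int × PySem.Set Nat)
    (busId : Nat) : List Int × PySem.Set Int × PySem.Set Nat :=
  if PySem.Set.contains q.2.2 busId then q
  else
    let c := pvCollect (routes.getD busId []) q.1 q.2.1
    (c.1, c.2, PySem.Set.add q.2.2 busId)

def pvBLoop (routes : List (List Int)) (info : PySem.Dict Int (PySem.Set Nat)) (T : Int) :
    Nat → List Int → List Int → Int → PySem.Set Int → PySem.Set Nat → Int
  | _, [], [], _, _, _ => -1
  | fuel, [], n :: ns, d, seen, used => pvBLoop routes info T fuel (n :: ns) [] (d + 1) seen used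
  | 0, _ :: _, _, _, _, _ => -1
  | fuel + 1, stop :: rest, next, d, seen, used =>
    if stop = T then d
    else
      let st := (info.getD stop PySem.Set.empty).foldl (pvStepB routes) ([], seen, used)
      pvBLoop routes info T fuel rest (next ++ st.1) d st.2.1 st.2.2
  termination_by fuel _ next _ _ _ => (fuel, next.length)
  decreasing_by
  · exact Prod.Lex.right _ (by simp)
  · exact Prod.Lex.left _ _ (Nat.lt_succ_self _)

-- one level-position step of pvBLoop's state, used to unroll a whole frontier
def pvLevelStep (routes : List (List Int)) (info : PySem.Dict Int (PySem.Set Nat))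
    (st : List Int × PySem.Set Int × PySem.Set Nat) (stop : Int) :
    List Int × PySem.Set Int × PySem.Set Nat :=
  let e := (info.getD stop PySem.Set.empty).foldl (pvStepB routes) ([], st.2.1, st.2.2)
  (st.1 ++ e.1, e.2.1, e.2.2)

-- ---------- stage 1: A's queue loop = the level-order loop ----------

-- A's mutated routes state corresponds to the level loop's visited-bus set:
-- bus i reads as [] iff i is visited, otherwise as the original route
def pvRel (routes : List (List Int)) (used : PySem.Set Nat) (rts : List (List Int)) : Prop :=
  rts.length = routes.length ∧
    ∀ i : Nat, rts.getD i [] = if i ∈ used then [] else routes.getD i []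

theorem pvRel_init (routes : List (List Int)) : pvRel routes PySem.Set.empty routes :=
  ⟨rfl, fun i => by rw [if_neg (by simp [PySem.Set.empty])]⟩

theorem pvGetD_set (l : List (List Int)) (n : Nat) (a : List Int) (i : Nat) :
    (l.set n a).getD i [] = if i = n ∧ n < l.length then a else l.getD i [] := by
  rcases Nat.lt_or_ge n l.length with h | h
  · by_cases hi : i = n
    · subst hi; simp [List.getD, h]
    · simp [List.getD, List.getElem?_set_ne (by omega : n ≠ i), hi]
  · rw [List.set_eq_of_length_le h, if_neg (by rintro ⟨-, h2⟩; omega)]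

theorem pv_expand_rel (routes : List (List Int)) (buses : List Nat) :
    ∀ (acc : List Int) (seen : PySem.Set Int) (used : PySem.Set Nat) (rts : List (List Int)),
      pvRel routes used rts →
      (buses.foldl pvStepA (acc, seen, rts)).1 =
          (buses.foldl (pvStepB routes) (acc, seen, used)).1 ∧
        (buses.foldl pvStepA (acc, seen, rts)).2.1 =
          (buses.foldl (pvStepB routes) (acc, seen, used)).2.1 ∧
        pvRel routes (buses.foldl (pvStepB routes) (acc, seen, used)).2.2
          (buses.foldl pvStepA (acc, seen, rts)).2.2 := by
  induction buses with
  | nil => intro acc seen used rts h; exact ⟨rfl, rfl, h⟩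
  | cons bus rest ih =>
    intro acc seen used rts h
    obtain ⟨hlen, hpt⟩ := h
    by_cases hb : bus ∈ used
    · -- visited bus: A reads [], clears an already-empty slot; B skips
      have hbc : PySem.Set.contains used bus = true := (PySem.Set.contains_iff used bus).mpr hb
      have hread : rts.getD bus [] = [] := by rw [hpt bus, if_pos hb]
      have hstepA : pvStepA (acc, seen, rts) bus = (acc, seen, rts.set bus []) := by
        have h0 : pvStepA (acc, seen, rts) bus =
            ((pvCollect (rts.getD bus []) acc seen).1,
              (pvCollect (rts.getD bus []) acc seen).2, rts.set bus []) := rfl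
        rw [h0, hread]; rfl
      have hstepB : pvStepB routes (acc, seen, used) bus = (acc, seen, used) := by
        unfold pvStepB; rw [if_pos hbc]
      have hrel' : pvRel routes used (rts.set bus []) := by
        refine ⟨by simpa using hlen, fun i => ?_⟩
        rw [pvGetD_set]
        by_cases hi : i = bus ∧ bus < rts.length
        · rw [if_pos hi, hi.1, if_pos hb]
        · rw [if_neg hi]; exact hpt i
      rw [List.foldl_cons, List.foldl_cons, hstepA, hstepB]
      exact ih acc seen used _ hrel'
    · -- fresh bus: both collect the same route; A clears it, B marks it visited
      have hbc : ¬ PySem.Set.contains used bus = true := fun hc => hb ((PySem.Set.contains_iff used bus).mp hc)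
      have hread : rts.getD bus [] = routes.getD bus [] := by rw [hpt bus, if_neg hb]
      have hstepA : pvStepA (acc, seen, rts) bus =
          ((pvCollect (routes.getD bus []) acc seen).1,
            (pvCollect (routes.getD bus []) acc seen).2, rts.set bus []) := by
        have h0 : pvStepA (acc, seen, rts) bus =
            ((pvCollect (rts.getD bus []) acc seen).1,
              (pvCollect (rts.getD bus []) acc seen).2, rts.set bus []) := rfl
        rw [h0, hread]
      have hstepB : pvStepB routes (acc, seen, used) bus =
          ((pvCollect (routes.getD bus []) acc seen).1,
            (pvCollect (routes.getD bus []) acc seen).2, PySem.Set.add used bus) := by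
        unfold pvStepB; rw [if_neg hbc]
      have hrel' : pvRel routes (PySem.Set.add used bus) (rts.set bus []) := by
        refine ⟨by simpa using hlen, fun i => ?_⟩
        rw [pvGetD_set]
        by_cases hib : i = bus
        · subst hib
          rw [if_pos ((PySem.Set.mem_add used i i).mpr (Or.inr rfl))]
          by_cases hlt : i < rts.length
          · rw [if_pos ⟨rfl, hlt⟩]
          · rw [if_neg (by rintro ⟨-, h2⟩; omega), hread]
            exact List.getD_eq_default _ _ (by omega)
        · rw [if_neg (by rintro ⟨h1, -⟩; exact hib h1)]
          have hmem : (i ∈ PySem.Set.add used bus) ↔ i ∈ used := by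
            rw [PySem.Set.mem_add used bus i]; exact or_iff_left hib
          by_cases hiu : i ∈ used
          · rw [if_pos (hmem.mpr hiu)]
            rw [hpt i, if_pos hiu]
          · rw [if_neg (fun hm => hiu (hmem.mp hm))]
            rw [hpt i, if_neg hiu]
      rw [List.foldl_cons, List.foldl_cons, hstepA, hstepB]
      exact ih _ _ (PySem.Set.add used bus) (rts.set bus []) hrel'

-- A's queue is the level loop's frontier tagged d followed by its next level tagged
-- d+1, under pvRel, for every common fuel value
theorem pv_loop_rel (routes : List (List Int)) (info : PySem.Dict Int (PySem.Set Nat)) (T : Int) :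
    ∀ (fuel : Nat) (stop : Int) (rest next : List Int) (d : Int)
      (seen : PySem.Set Int) (used : PySem.Set Nat) (rts : List (List Int)),
      pvRel routes used rts →
      pvALoop info T fuel
          ((stop :: rest).map (fun s => (s, d)) ++ next.map (fun s => (s, d + 1))) seen rts =
        pvBLoop routes info T fuel (stop :: rest) next d seen used := by
  intro fuel
  induction fuel with
  | zero =>
    intro stop rest next d seen used rts _
    rw [pvBLoop]; rfl
  | succ f ih =>
    intro stop rest next d seen used rts h
    rw [pvBLoop]
    simp only [List.map_cons, List.cons_append, pvALoop]
    by_cases hT : stop = T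
    · simp [hT]
    · rw [if_neg hT, if_neg hT]
      obtain ⟨h1, h2, h3⟩ := pv_expand_rel routes
        ((info.getD stop PySem.Set.empty) : List Nat) [] seen used rts h
      rw [h1, h2]
      set stB := ((info.getD stop PySem.Set.empty) : List Nat).foldl (pvStepB routes)
        ([], seen, used) with hstB
      -- A's new pending = rest@d ++ (next ++ news)@(d+1)
      have hpend :
          (rest.map (fun s => (s, d)) ++ next.map (fun s => (s, d + 1))) ++
            stB.1.map (fun s => (s, d + 1)) =
          rest.map (fun s => (s, d)) ++ (next ++ stB.1).map (fun s => (s, d + 1)) := by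
        rw [List.map_append, List.append_assoc]
      rw [hpend]
      cases rest with
      | cons r rs => exact ih r rs (next ++ stB.1) d stB.2.1 stB.2.2 _ h3
      | nil =>
        cases hnn : next ++ stB.1 with
        | nil =>
          simp only [List.map_nil, List.nil_append]
          rw [pvALoop.eq_def, pvBLoop]
        | cons m ms =>
          have := ih m ms [] (d + 1) stB.2.1 stB.2.2 _ h3
          simp only [List.map_nil, List.append_nil, List.nil_append] at this ⊢
          rw [this]
          conv_rhs => rw [pvBLoop]

-- ---------- stage 2: the level-order loop = B's saturation ----------

-- characterization of pvCollect: membership, nodup, lengths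
theorem pv_collect_spec (route : List Int) :
    ∀ (acc : List Int) (seen : PySem.Set Int), seen.Nodup →
      (∀ x, x ∈ (pvCollect route acc seen).2 ↔ x ∈ seen ∨ x ∈ route) ∧
      (∀ x, x ∈ (pvCollect route acc seen).1 ↔
          x ∈ acc ∨ (x ∉ seen ∧ x ∈ (pvCollect route acc seen).2)) ∧
      (pvCollect route acc seen).2.Nodup ∧
      (pvCollect route acc seen).2.length + acc.length =
        seen.length + (pvCollect route acc seen).1.length := by
  induction route with
  | nil =>
    intro acc seen h
    refine ⟨fun x => by simp [pvCollect], fun x => ?_, h, by simp [pvCollect]⟩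
    simp only [pvCollect]
    constructor
    · exact fun hx => Or.inl hx
    · rintro (hx | ⟨hns, hs⟩)
      · exact hx
      · exact absurd hs hns
  | cons t ts ih =>
    intro acc seen h
    by_cases ht : t ∈ seen
    · have he : pvCollect (t :: ts) acc seen = pvCollect ts acc seen := by
        rw [pvCollect, if_pos ((PySem.Set.contains_iff seen t).mpr ht)]
      rw [he]
      obtain ⟨c1, c2, c3, c4⟩ := ih acc seen h
      refine ⟨fun x => ?_, c2, c3, c4⟩
      rw [c1 x]
      simp only [List.mem_cons]
      constructor
      · rintro (hx | hx)
        · exact Or.inl hx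
        · exact Or.inr (Or.inr hx)
      · rintro (hx | rfl | hx)
        · exact Or.inl hx
        · exact Or.inl ht
        · exact Or.inr hx
    · have hc : ¬ PySem.Set.contains seen t = true :=
        fun hc => ht ((PySem.Set.contains_iff seen t).mp hc)
      have he : pvCollect (t :: ts) acc seen =
          pvCollect ts (acc ++ [t]) (PySem.Set.add seen t) := by
        rw [pvCollect, if_neg hc]
      have hmem' : ∀ x, x ∈ PySem.Set.add seen t ↔ x ∈ seen ∨ x = t :=
        PySem.Set.mem_add seen t
      have hlen' : (PySem.Set.add seen t).length = seen.length + 1 := by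
        rw [PySem.Set.add_of_not_mem ht]; simp
      obtain ⟨c1, c2, c3, c4⟩ := ih (acc ++ [t]) (PySem.Set.add seen t) (PySem.Set.nodup_add seen t h)
      rw [he]
      refine ⟨fun x => ?_, fun x => ?_, c3, ?_⟩
      · rw [c1 x]
        simp only [hmem' x, List.mem_cons]
        tauto
      · rw [c2 x]
        have hx2t : t ∈ (pvCollect ts (acc ++ [t]) (PySem.Set.add seen t)).2 :=
          (c1 t).mpr (Or.inl ((hmem' t).mpr (Or.inr rfl)))
        constructor
        · rintro (hx | ⟨hns, hP⟩)
          · rcases List.mem_append.mp hx with hx | hx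
            · exact Or.inl hx
            · have hxt : x = t := by simpa using hx
              subst hxt; exact Or.inr ⟨ht, hx2t⟩
          · exact Or.inr ⟨fun hs => hns ((hmem' x).mpr (Or.inl hs)), hP⟩
        · rintro (hx | ⟨hns, hP⟩)
          · exact Or.inl (List.mem_append_left _ hx)
          · by_cases hxt : x = t
            · subst hxt; exact Or.inl (List.mem_append_right _ (by simp))
            · refine Or.inr ⟨fun hs => ?_, hP⟩
              rcases (hmem' x).mp hs with hs' | hs'
              · exact hns hs'
              · exact hxt hs'
      · have h4 := c4
        simp only [hlen', List.length_append, List.length_cons, List.length_nil] at h4 ⊢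
        omega

-- characterization of a whole bus-set expansion (fold of pvStepB)
theorem pv_busfold_spec (routes : List (List Int)) (L : List Nat) :
    ∀ (a : List Int) (s : PySem.Set Int) (u : PySem.Set Nat), s.Nodup →
      (∀ b ∈ u, ∀ x ∈ routes.getD b [], x ∈ s) →
      (∀ x, x ∈ (L.foldl (pvStepB routes) (a, s, u)).2.1 ↔
          x ∈ s ∨ ∃ b ∈ L, x ∈ routes.getD b []) ∧
      (∀ x, x ∈ (L.foldl (pvStepB routes) (a, s, u)).1 ↔
          x ∈ a ∨ (x ∉ s ∧ x ∈ (L.foldl (pvStepB routes) (a, s, u)).2.1)) ∧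
      (∀ b, b ∈ (L.foldl (pvStepB routes) (a, s, u)).2.2 ↔ b ∈ u ∨ b ∈ L) ∧
      (L.foldl (pvStepB routes) (a, s, u)).2.1.Nodup ∧
      (∀ b ∈ (L.foldl (pvStepB routes) (a, s, u)).2.2, ∀ x ∈ routes.getD b [],
          x ∈ (L.foldl (pvStepB routes) (a, s, u)).2.1) ∧
      (L.foldl (pvStepB routes) (a, s, u)).2.1.length + a.length =
        s.length + (L.foldl (pvStepB routes) (a, s, u)).1.length := by
  induction L with
  | nil =>
    intro a s u hnd h5
    refine ⟨by simp, fun x => ?_, by simp, hnd, by simpa using h5, by simp⟩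
    simp only [List.foldl_nil]
    constructor
    · exact Or.inl
    · rintro (h | ⟨hn, hs⟩)
      · exact h
      · exact absurd hs hn
  | cons b L ih =>
    intro a s u hnd h5
    by_cases hb : b ∈ u
    · have hstep : pvStepB routes (a, s, u) b = (a, s, u) := by
        unfold pvStepB; rw [if_pos ((PySem.Set.contains_iff u b).mpr hb)]
      rw [List.foldl_cons, hstep]
      obtain ⟨c1, c2, c3, c4, c5, c6⟩ := ih a s u hnd h5
      refine ⟨fun x => ?_, c2, fun b' => ?_, c4, c5, c6⟩
      · rw [c1 x]
        constructor
        · rintro (h | ⟨b', hb', hx⟩)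
          · exact Or.inl h
          · exact Or.inr ⟨b', List.mem_cons_of_mem _ hb', hx⟩
        · rintro (h | ⟨b', hb', hx⟩)
          · exact Or.inl h
          · rcases List.mem_cons.mp hb' with rfl | hb''
            · exact Or.inl (h5 b' hb x hx)
            · exact Or.inr ⟨b', hb'', hx⟩
      · rw [c3 b']
        simp only [List.mem_cons]
        constructor
        · rintro (h | h)
          · exact Or.inl h
          · exact Or.inr (Or.inr h)
        · rintro (h | rfl | h)
          · exact Or.inl h
          · exact Or.inl hb
          · exact Or.inr h
    · have hc : ¬ PySem.Set.contains u b = true :=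
        fun hc => hb ((PySem.Set.contains_iff u b).mp hc)
      have hstep : pvStepB routes (a, s, u) b =
          ((pvCollect (routes.getD b []) a s).1, (pvCollect (routes.getD b []) a s).2,
            PySem.Set.add u b) := by
        unfold pvStepB; rw [if_neg hc]
      obtain ⟨e1, e2, e3, e4⟩ := pv_collect_spec (routes.getD b []) a s hnd
      set c := pvCollect (routes.getD b []) a s with hcdef
      have h5' : ∀ b' ∈ PySem.Set.add u b, ∀ x ∈ routes.getD b' [], x ∈ c.2 := by
        intro b' hb' x hx
        rcases (PySem.Set.mem_add u b b').mp hb' with h | rfl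
        · exact (e1 x).mpr (Or.inl (h5 b' h x hx))
        · exact (e1 x).mpr (Or.inr hx)
      obtain ⟨c1, c2, c3, c4, c5, c6⟩ := ih c.1 c.2 (PySem.Set.add u b) e3 h5'
      rw [List.foldl_cons, hstep]
      have hsub : ∀ x, x ∈ s → x ∈ c.2 := fun x hx => (e1 x).mpr (Or.inl hx)
      have hsub2 : ∀ x, x ∈ c.2 →
          x ∈ (L.foldl (pvStepB routes) (c.1, c.2, PySem.Set.add u b)).2.1 :=
        fun x hx => (c1 x).mpr (Or.inl hx)
      refine ⟨fun x => ?_, fun x => ?_, fun b' => ?_, c4, c5, ?_⟩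
      · rw [c1 x]
        constructor
        · rintro (hx | ⟨b', hb', hxx⟩)
          · rcases (e1 x).mp hx with h | h
            · exact Or.inl h
            · exact Or.inr ⟨b, by simp, h⟩
          · exact Or.inr ⟨b', List.mem_cons_of_mem _ hb', hxx⟩
        · rintro (hx | ⟨b', hb', hxx⟩)
          · exact Or.inl (hsub x hx)
          · rcases List.mem_cons.mp hb' with rfl | h
            · exact Or.inl ((e1 x).mpr (Or.inr hxx))
            · exact Or.inr ⟨b', h, hxx⟩
      · rw [c2 x]
        constructor
        · rintro (hx | ⟨hn, hr⟩)
          · rcases (e2 x).mp hx with h | ⟨hn, h⟩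
            · exact Or.inl h
            · exact Or.inr ⟨hn, hsub2 x h⟩
          · exact Or.inr ⟨fun hs => hn (hsub x hs), hr⟩
        · rintro (hx | ⟨hn, hr⟩)
          · exact Or.inl ((e2 x).mpr (Or.inl hx))
          · by_cases hxc : x ∈ c.2
            · exact Or.inl ((e2 x).mpr (Or.inr ⟨hn, hxc⟩))
            · exact Or.inr ⟨hxc, hr⟩
      · rw [c3 b']
        simp only [PySem.Set.mem_add, List.mem_cons]
        tauto
      · have h6 := c6
        have h7 := e4
        omega

-- characterization of processing a whole frontier (fold of pvLevelStep)
theorem pv_levelfold_spec (routes : List (List Int)) (info : PySem.Dict Int (PySem.Set Nat))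
    (F : List Int) :
    ∀ (n : List Int) (s : PySem.Set Int) (u : PySem.Set Nat), s.Nodup →
      (∀ b ∈ u, ∀ x ∈ routes.getD b [], x ∈ s) →
      (∀ x, x ∈ (F.foldl (pvLevelStep routes info) (n, s, u)).2.1 ↔
          x ∈ s ∨ ∃ b : Nat, (∃ stop ∈ F, b ∈ info.getD stop PySem.Set.empty) ∧
            x ∈ routes.getD b []) ∧
      (∀ x, x ∈ (F.foldl (pvLevelStep routes info) (n, s, u)).1 ↔
          x ∈ n ∨ (x ∉ s ∧ x ∈ (F.foldl (pvLevelStep routes info) (n, s, u)).2.1)) ∧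
      (∀ b : Nat, b ∈ (F.foldl (pvLevelStep routes info) (n, s, u)).2.2 ↔
          b ∈ u ∨ ∃ stop ∈ F, b ∈ info.getD stop PySem.Set.empty) ∧
      (F.foldl (pvLevelStep routes info) (n, s, u)).2.1.Nodup ∧
      (∀ b ∈ (F.foldl (pvLevelStep routes info) (n, s, u)).2.2, ∀ x ∈ routes.getD b [],
          x ∈ (F.foldl (pvLevelStep routes info) (n, s, u)).2.1) ∧
      (F.foldl (pvLevelStep routes info) (n, s, u)).2.1.length + n.length =
        s.length + (F.foldl (pvLevelStep routes info) (n, s, u)).1.length := by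
  induction F with
  | nil =>
    intro n s u hnd h5
    refine ⟨by simp, fun x => ?_, by simp, hnd, by simpa using h5, by simp⟩
    simp only [List.foldl_nil]
    constructor
    · exact Or.inl
    · rintro (h | ⟨hn, hs⟩)
      · exact h
      · exact absurd hs hn
  | cons f fs ih =>
    intro n s u hnd h5
    obtain ⟨e1, e2, e3, e4, e5, e6⟩ :=
      pv_busfold_spec routes ((info.getD f PySem.Set.empty) : List Nat) [] s u hnd h5
    set e := ((info.getD f PySem.Set.empty) : List Nat).foldl (pvStepB routes) ([], s, u)
      with hedef
    have hstep : pvLevelStep routes info (n, s, u) f = (n ++ e.1, e.2.1, e.2.2) := rfl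
    have e2' : ∀ x, x ∈ e.1 ↔ x ∉ s ∧ x ∈ e.2.1 := by
      intro x
      rw [e2 x]
      simp only [List.not_mem_nil, false_or]
    obtain ⟨c1, c2, c3, c4, c5, c6⟩ := ih (n ++ e.1) e.2.1 e.2.2 e4 e5
    rw [List.foldl_cons, hstep]
    set r := fs.foldl (pvLevelStep routes info) (n ++ e.1, e.2.1, e.2.2) with hrdef
    have hsub : ∀ x, x ∈ s → x ∈ e.2.1 := fun x hx => (e1 x).mpr (Or.inl hx)
    have hsub2 : ∀ x, x ∈ e.2.1 → x ∈ r.2.1 := fun x hx => (c1 x).mpr (Or.inl hx)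
    refine ⟨fun x => ?_, fun x => ?_, fun b => ?_, c4, c5, ?_⟩
    · rw [c1 x]
      constructor
      · rintro (hx | ⟨b, ⟨stop, hstop, hbi⟩, hxx⟩)
        · rcases (e1 x).mp hx with h | ⟨b, hbi, hxx⟩
          · exact Or.inl h
          · exact Or.inr ⟨b, ⟨f, by simp, hbi⟩, hxx⟩
        · exact Or.inr ⟨b, ⟨stop, List.mem_cons_of_mem _ hstop, hbi⟩, hxx⟩
      · rintro (hx | ⟨b, ⟨stop, hstop, hbi⟩, hxx⟩)
        · exact Or.inl (hsub x hx)
        · rcases List.mem_cons.mp hstop with rfl | hstop'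
          · exact Or.inl ((e1 x).mpr (Or.inr ⟨b, hbi, hxx⟩))
          · exact Or.inr ⟨b, ⟨stop, hstop', hbi⟩, hxx⟩
    · rw [c2 x]
      constructor
      · rintro (hx | ⟨hn2, hr⟩)
        · rcases List.mem_append.mp hx with h | h
          · exact Or.inl h
          · obtain ⟨hns, hxe⟩ := (e2' x).mp h
            exact Or.inr ⟨hns, hsub2 x hxe⟩
        · exact Or.inr ⟨fun hs => hn2 (hsub x hs), hr⟩
      · rintro (hx | ⟨hns, hr⟩)
        · exact Or.inl (List.mem_append_left _ hx)
        · by_cases hxe : x ∈ e.2.1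
          · exact Or.inl (List.mem_append_right _ ((e2' x).mpr ⟨hns, hxe⟩))
          · exact Or.inr ⟨hxe, hr⟩
    · rw [c3 b]
      constructor
      · rintro (hb | ⟨stop, hstop, hbi⟩)
        · rcases (e3 b).mp hb with h | h
          · exact Or.inl h
          · exact Or.inr ⟨f, by simp, h⟩
        · exact Or.inr ⟨stop, List.mem_cons_of_mem _ hstop, hbi⟩
      · rintro (hb | ⟨stop, hstop, hbi⟩)
        · exact Or.inl ((e3 b).mpr (Or.inl hb))
        · rcases List.mem_cons.mp hstop with rfl | hstop'
          · exact Or.inl ((e3 b).mpr (Or.inr hbi))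
          · exact Or.inr ⟨stop, hstop', hbi⟩
    · have h6 := c6
      have h7 := e6
      simp only [List.length_append, List.length_nil] at h6 h7 ⊢
      omega

-- stopInfo characterization: bus b is listed under stop iff stop lies on route b
theorem pv_stopInfo_inner (i : Nat) (route : List Int) :
    ∀ (d : PySem.Dict Int (PySem.Set Nat)) (stop : Int) (b : Nat),
      b ∈ (route.foldl
            (fun d s => d.modify s PySem.Set.empty (fun t => PySem.Set.add t i)) d).getD
          stop PySem.Set.empty ↔
        b ∈ d.getD stop PySem.Set.empty ∨ (stop ∈ route ∧ b = i) := by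
  induction route with
  | nil => intro d stop b; simp
  | cons s ss ih =>
    intro d stop b
    rw [List.foldl_cons, ih]
    rw [PySem.Dict.getD_modify]
    by_cases hs : stop = s
    · subst hs
      rw [if_pos rfl]
      simp only [PySem.Set.mem_add, List.mem_cons]
      tauto
    · rw [if_neg hs]
      simp only [List.mem_cons]
      tauto

theorem pv_mem_stopInfo (routes : List (List Int)) (stop : Int) (b : Nat) :
    b ∈ (pvStopInfo routes).getD stop PySem.Set.empty ↔
      b < routes.length ∧ stop ∈ routes.getD b [] := by
  have aux : ∀ (L : List (List Int × Nat)) (d : PySem.Dict Int (PySem.Set Nat)),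
      b ∈ (L.foldl
            (fun d p =>
              p.1.foldl (fun d stop => d.modify stop PySem.Set.empty (fun s => PySem.Set.add s p.2)) d)
            d).getD stop PySem.Set.empty ↔
        b ∈ d.getD stop PySem.Set.empty ∨ ∃ p ∈ L, stop ∈ p.1 ∧ b = p.2 := by
    intro L
    induction L with
    | nil => intro d; simp
    | cons p ps ihp =>
      intro d
      rw [List.foldl_cons, ihp, pv_stopInfo_inner]
      simp only [List.mem_cons]
      constructor
      · rintro (⟨h | ⟨h1, h2⟩⟩ | ⟨q, hq, h1, h2⟩)
        · exact Or.inl h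
        · exact Or.inr ⟨p, Or.inl rfl, h1, h2⟩
        · exact Or.inr ⟨q, Or.inr hq, h1, h2⟩
      · rintro (h | ⟨q, hq | hq, h1, h2⟩)
        · exact Or.inl (Or.inl h)
        · subst hq; exact Or.inl (Or.inr ⟨h1, h2⟩)
        · exact Or.inr ⟨q, hq, h1, h2⟩
  unfold pvStopInfo
  rw [aux]
  simp only [PySem.Dict.getD_empty]
  constructor
  · rintro (h | ⟨p, hp, h1, h2⟩)
    · simp [PySem.Set.empty] at h
    · have := List.mem_zipIdx (k := 0) hp
      obtain ⟨-, hlt, heq⟩ := this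
      subst h2
      refine ⟨by simpa using hlt, ?_⟩
      rw [List.getD_eq_getElem _ _ (by simpa using hlt)]
      simpa [heq] using h1
  · rintro ⟨hlt, hmem⟩
    refine Or.inr ⟨(routes[b], b), ?_, ?_, rfl⟩
    · exact List.mk_mem_zipIdx_iff_getElem?.mpr (List.getElem?_eq_getElem hlt)
    · rwa [List.getD_eq_getElem _ _ hlt] at hmem

-- pvGrow characterization
theorem pv_grow_mem_aux (reach : PySem.Set Int) (routes : List (List Int)) :
    ∀ (g : PySem.Set Int) (x : Int),
      x ∈ routes.foldl
          (fun g route => if !(PySem.Set.isdisjoint reach route) then PySem.Set.update g route else g)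
          g ↔
        x ∈ g ∨ ∃ r ∈ routes, (∃ y ∈ reach, y ∈ r) ∧ x ∈ r := by
  induction routes with
  | nil => intro g x; simp
  | cons r rs ih =>
    intro g x
    rw [List.foldl_cons]
    cases hdj : PySem.Set.isdisjoint reach r with
    | true =>
      have hno : ¬ ∃ y ∈ reach, y ∈ r := by
        rintro ⟨y, hy, hyr⟩
        exact ((PySem.Set.isdisjoint_iff reach r).mp hdj y hy) hyr
      simp only [Bool.not_true, Bool.false_eq_true, if_false]
      rw [ih g x]
      simp only [List.mem_cons]
      constructor
      · rintro (h | ⟨q, hq, h1, h2⟩)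
        · exact Or.inl h
        · exact Or.inr ⟨q, Or.inr hq, h1, h2⟩
      · rintro (h | ⟨q, hq | hq, h1, h2⟩)
        · exact Or.inl h
        · subst hq; exact absurd h1 hno
        · exact Or.inr ⟨q, hq, h1, h2⟩
    | false =>
      have hyes : ∃ y ∈ reach, y ∈ r := by
        have : ¬ PySem.Set.isdisjoint reach r = true := by simp [hdj]
        rw [PySem.Set.isdisjoint_iff] at this
        push Not at this
        exact this
      simp only [Bool.not_false, if_true]
      rw [ih (PySem.Set.update g r) x]
      simp only [PySem.Set.mem_update, List.mem_cons]
      constructor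
      · rintro ((h | h) | ⟨q, hq, h1, h2⟩)
        · exact Or.inl h
        · exact Or.inr ⟨r, Or.inl rfl, hyes, h⟩
        · exact Or.inr ⟨q, Or.inr hq, h1, h2⟩
      · rintro (h | ⟨q, hq | hq, h1, h2⟩)
        · exact Or.inl (Or.inl h)
        · subst hq; exact Or.inl (Or.inr h2)
        · exact Or.inr ⟨q, hq, h1, h2⟩

theorem pv_grow_mem (routes : List (List Int)) (reach : PySem.Set Int) (x : Int) :
    x ∈ pvGrow routes reach ↔
      x ∈ reach ∨ ∃ r ∈ routes, (∃ y ∈ reach, y ∈ r) ∧ x ∈ r := by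
  unfold pvGrow
  exact pv_grow_mem_aux reach routes reach x

theorem pv_grow_nodup (routes : List (List Int)) (reach : PySem.Set Int)
    (h : reach.Nodup) : (pvGrow routes reach).Nodup := by
  unfold pvGrow
  suffices haux : ∀ g : PySem.Set Int, g.Nodup →
      (routes.foldl
        (fun g route => if !(PySem.Set.isdisjoint reach route) then PySem.Set.update g route else g)
        g).Nodup from haux reach h
  induction routes with
  | nil => intro g hg; simpa using hg
  | cons r rs ih =>
    intro g hg
    rw [List.foldl_cons]
    cases hdj : PySem.Set.isdisjoint reach r with
    | true => simp only [Bool.not_true, Bool.false_eq_true, if_false]; exact ih g hg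
    | false =>
      simp only [Bool.not_false, if_true]
      exact ih _ (PySem.Set.nodup_update g r hg)

-- pvFuel = total number of stop entries + 1
theorem pv_fuel_eq (routes : List (List Int)) : pvFuel routes = routes.flatten.length + 1 := by
  suffices haux : ∀ (init : Nat),
      routes.foldl (fun a r => a + r.length) init = init + routes.flatten.length by
    unfold pvFuel
    rw [haux 0]
    omega
  induction routes with
  | nil => intro init; simp
  | cons r rs ih =>
    intro init
    rw [List.foldl_cons, ih]
    simp [List.flatten_cons]
    omega

theorem pv_mem_getD_flatten (routes : List (List Int)) (b : Nat) (x : Int)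
    (h : x ∈ routes.getD b []) : x ∈ routes.flatten := by
  by_cases hb : b < routes.length
  · rw [List.getD_eq_getElem _ _ hb] at h
    exact List.mem_flatten.mpr ⟨routes[b], List.getElem_mem hb, h⟩
  · rw [List.getD_eq_default _ _ (by omega)] at h
    simp at h

-- a nodup list contained in another list is no longer than it
theorem pv_nodup_length_le (l m : List Int) (h : l.Nodup) (hs : ∀ x ∈ l, x ∈ m) :
    l.length ≤ m.length := by
  calc l.length = l.toFinset.card := (List.toFinset_card_of_nodup h).symm
    _ ≤ m.toFinset.card := by
        apply Finset.card_le_card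
        intro x hx
        rw [List.mem_toFinset] at hx ⊢
        exact hs x hx
    _ ≤ m.length := List.toFinset_card_le m

-- a frontier containing T makes the level loop return its depth
theorem pv_hit (routes : List (List Int)) (info : PySem.Dict Int (PySem.Set Nat)) (T : Int) :
    ∀ (F : List Int) (fuel : Nat) (next : List Int) (d : Int)
      (seen : PySem.Set Int) (used : PySem.Set Nat),
      T ∈ F → F.length ≤ fuel →
      pvBLoop routes info T fuel F next d seen used = d := by
  intro F
  induction F with
  | nil => intro fuel next d seen used hT; exact absurd hT (List.not_mem_nil)
  | cons f fs ih =>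
    intro fuel next d seen used hT hlen
    cases fuel with
    | zero => simp at hlen
    | succ fuel =>
      rw [pvBLoop]
      by_cases hf : f = T
      · rw [if_pos hf]
      · rw [if_neg hf]
        rcases List.mem_cons.mp hT with rfl | hT'
        · exact absurd rfl hf
        · exact ih fuel _ d _ _ hT' (by simpa using hlen)

-- unrolling a whole T-free frontier of the level loop
theorem pv_unroll (routes : List (List Int)) (info : PySem.Dict Int (PySem.Set Nat)) (T : Int) :
    ∀ (F : List Int) (fuel : Nat) (next : List Int) (d : Int)
      (seen : PySem.Set Int) (used : PySem.Set Nat),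
      T ∉ F →
      pvBLoop routes info T (F.length + fuel) F next d seen used =
        pvBLoop routes info T fuel []
          (F.foldl (pvLevelStep routes info) (next, seen, used)).1 d
          (F.foldl (pvLevelStep routes info) (next, seen, used)).2.1
          (F.foldl (pvLevelStep routes info) (next, seen, used)).2.2 := by
  intro F
  induction F with
  | nil => intro fuel next d seen used _; simp
  | cons f fs ih =>
    intro fuel next d seen used hT
    have hlen : (f :: fs).length + fuel = (fs.length + fuel) + 1 := by
      simp [List.length_cons]; omega
    rw [hlen, pvBLoop]
    have hf : ¬ f = T := fun h => hT (h ▸ List.mem_cons_self)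
    rw [if_neg hf]
    have hT' : T ∉ fs := fun h => hT (List.mem_cons_of_mem _ h)
    rw [ih fuel _ d _ _ hT']
    rfl

-- the central lemma: the level loop equals B's saturation loop
theorem pv_main (routes : List (List Int)) (S T : Int) :
    ∀ (fS : Nat) (fuel : Nat) (F : List Int) (d : Int)
      (seen reach : PySem.Set Int) (used : PySem.Set Nat),
      seen.Nodup → reach.Nodup →
      (∀ x, x ∈ seen ↔ x ∈ reach) →
      (T ∈ seen → T ∈ F) →
      (∀ x ∈ F, x ∈ seen) →
      (∀ (b : Nat) (x : Int), x ∈ routes.getD b [] → x ∈ seen → x ∉ F → b ∈ used) →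
      (∀ b ∈ used, ∀ x ∈ routes.getD b [], x ∈ seen) →
      (∀ x ∈ seen, x = S ∨ x ∈ routes.flatten) →
      F.length + pvFuel routes ≤ fuel + seen.length →
      1 + pvFuel routes ≤ fS + seen.length →
      pvBLoop routes (pvStopInfo routes) T fuel F [] d seen used = pvSat routes T fS reach d := by
  intro fS
  induction fS with
  | zero =>
    intro fuel F d seen reach used hsn hrn h1 h2 h3 h4 h5 h7 h8 h9
    exfalso
    have hsub : ∀ x ∈ seen, x ∈ S :: routes.flatten := by
      intro x hx
      rcases h7 x hx with rfl | h
      · exact List.mem_cons_self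
      · exact List.mem_cons_of_mem _ h
    have hle := pv_nodup_length_le seen (S :: routes.flatten) hsn hsub
    have hN := pv_fuel_eq routes
    simp only [List.length_cons] at hle
    omega
  | succ fS ih =>
    intro fuel F d seen reach used hsn hrn h1 h2 h3 h4 h5 h7 h8 h9
    have hsub : ∀ x ∈ seen, x ∈ S :: routes.flatten := by
      intro x hx
      rcases h7 x hx with rfl | h
      · exact List.mem_cons_self
      · exact List.mem_cons_of_mem _ h
    have hseenN : seen.length ≤ pvFuel routes := by
      have hle := pv_nodup_length_le seen (S :: routes.flatten) hsn hsub
      have hN := pv_fuel_eq routes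
      simp only [List.length_cons] at hle
      omega
    by_cases hT : T ∈ reach
    · have hcT : PySem.Set.contains reach T = true := (PySem.Set.contains_iff reach T).mpr hT
      rw [pvSat, if_pos hcT]
      exact pv_hit routes (pvStopInfo routes) T F fuel [] d seen used
        (h2 ((h1 T).mpr hT)) (by omega)
    · have hcT : ¬ PySem.Set.contains reach T = true :=
        fun hc => hT ((PySem.Set.contains_iff reach T).mp hc)
      have hTs : T ∉ seen := fun h => hT ((h1 T).mp h)
      have hTF : T ∉ F := fun h => hTs (h3 T h)
      rw [pvSat, if_neg hcT]
      show pvBLoop routes (pvStopInfo routes) T fuel F [] d seen used =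
        if PySem.Set.len (pvGrow routes reach) = PySem.Set.len reach then -1
        else pvSat routes T fS (pvGrow routes reach) (d + 1)
      have hfge : F.length ≤ fuel := by omega
      obtain ⟨C1, C2, C3, C4, C5, C6⟩ :=
        pv_levelfold_spec routes (pvStopInfo routes) F [] seen used hsn h5
      rw [show fuel = F.length + (fuel - F.length) by omega,
        pv_unroll routes (pvStopInfo routes) T F (fuel - F.length) [] d seen used hTF]
      set r := F.foldl (pvLevelStep routes (pvStopInfo routes)) ([], seen, used) with hrdef
      have hkey : ∀ x, x ∈ r.2.1 ↔ x ∈ pvGrow routes reach := by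
        intro x
        rw [C1 x, pv_grow_mem routes reach x]
        constructor
        · rintro (hx | ⟨b, ⟨stop, hstopF, hbi⟩, hx⟩)
          · exact Or.inl ((h1 x).mp hx)
          · obtain ⟨hblt, hstopb⟩ := (pv_mem_stopInfo routes stop b).mp hbi
            refine Or.inr ⟨routes.getD b [], ?_, ⟨stop, (h1 stop).mp (h3 stop hstopF), hstopb⟩, hx⟩
            rw [List.getD_eq_getElem _ _ hblt]
            exact List.getElem_mem hblt
        · rintro (hx | ⟨rt, hrt, ⟨y, hyreach, hyr⟩, hxr⟩)
          · exact Or.inl ((h1 x).mpr hx)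
          · obtain ⟨i, hi, hieq⟩ := List.mem_iff_getElem.mp hrt
            have hgd : routes.getD i [] = rt := by rw [List.getD_eq_getElem _ _ hi, hieq]
            have hys : y ∈ seen := (h1 y).mpr hyreach
            by_cases hyF : y ∈ F
            · exact Or.inr ⟨i, ⟨y, hyF, (pv_mem_stopInfo routes y i).mpr ⟨hi, hgd ▸ hyr⟩⟩,
                hgd ▸ hxr⟩
            · have hiu : i ∈ used := h4 i y (hgd ▸ hyr) hys hyF
              exact Or.inl (h5 i hiu x (hgd ▸ hxr))
      have hgnodup := pv_grow_nodup routes reach hrn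
      have hglen : (pvGrow routes reach).length = r.2.1.length :=
        ((List.perm_ext_iff_of_nodup hgnodup C4).mpr (fun x => (hkey x).symm)).length_eq
      have hrlen : reach.length = seen.length :=
        ((List.perm_ext_iff_of_nodup hrn hsn).mpr (fun x => (h1 x).symm)).length_eq
      cases hF : r.1 with
      | nil =>
        have hlen0 : r.2.1.length = seen.length := by
          have h6 := C6
          rw [hF] at h6
          simpa using h6
        rw [if_pos (by
          show ((pvGrow routes reach).length : Int) = (reach.length : Int)
          rw [hglen, hlen0, hrlen])]
        rw [pvBLoop]
      | cons f fs =>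
        have hlenF : r.2.1.length = seen.length + (fs.length + 1) := by
          have h6 := C6
          rw [hF] at h6
          simpa using h6
        rw [if_neg (by
          show ¬ ((pvGrow routes reach).length : Int) = (reach.length : Int)
          intro hc
          have hc' : (pvGrow routes reach).length = reach.length := by exact_mod_cast hc
          omega)]
        rw [pvBLoop]
        have h2' : T ∈ r.2.1 → T ∈ f :: fs := by
          intro hTr
          have : T ∈ r.1 := (C2 T).mpr (Or.inr ⟨hTs, hTr⟩)
          rwa [hF] at this
        have h3' : ∀ x ∈ f :: fs, x ∈ r.2.1 := by
          intro x hx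
          have hx1 : x ∈ r.1 := by rw [hF]; exact hx
          rcases (C2 x).mp hx1 with h | ⟨-, h⟩
          · exact absurd h (List.not_mem_nil)
          · exact h
        have h4' : ∀ (b : Nat) (x : Int), x ∈ routes.getD b [] → x ∈ r.2.1 →
            x ∉ f :: fs → b ∈ r.2.2 := by
          intro b x hxb hxr hxF'
          have hxr1 : x ∉ r.1 := by rw [hF]; exact hxF'
          have hxseen : x ∈ seen := by
            by_contra hxs
            exact hxr1 ((C2 x).mpr (Or.inr ⟨hxs, hxr⟩))
          have hblt : b < routes.length := by
            by_contra hb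
            push Not at hb
            rw [List.getD_eq_default _ _ (by omega)] at hxb
            simp at hxb
          by_cases hxF0 : x ∈ F
          · exact (C3 b).mpr (Or.inr ⟨x, hxF0, (pv_mem_stopInfo routes x b).mpr ⟨hblt, hxb⟩⟩)
          · exact (C3 b).mpr (Or.inl (h4 b x hxb hxseen hxF0))
        have h7' : ∀ x ∈ r.2.1, x = S ∨ x ∈ routes.flatten := by
          intro x hx
          rcases (C1 x).mp hx with h | ⟨b, -, hxb⟩
          · exact h7 x h
          · exact Or.inr (pv_mem_getD_flatten routes b x hxb)
        exact ih (fuel - F.length) (f :: fs) (d + 1) r.2.1 (pvGrow routes reach) r.2.2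
          C4 hgnodup hkey h2' h3' h4' C5 h7'
          (by simp only [List.length_cons]; omega)
          (by omega)

-- ===== VERDICT (by name: the statement is the Claim_ definition above) =====
theorem graph_depth_spec : Claim_equal_graph_depth := by
  intro routes S T _
  unfold Spec_graph_depth graph_depth graph_depth_alt
  have h0 := pv_loop_rel routes (pvStopInfo routes) T (pvFuel routes) S [] [] 0
    (PySem.Set.ofList [S]) PySem.Set.empty routes (pvRel_init routes)
  simp only [List.map_cons, List.map_nil, List.append_nil] at h0
  rw [h0]
  have hmemS : ∀ x : Int, x ∈ PySem.Set.ofList [S] ↔ x = S := by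
    intro x
    rw [PySem.Set.mem_ofList]
    simp
  have hlenS : 1 ≤ (PySem.Set.ofList [S] : List Int).length :=
    List.length_pos_of_mem ((hmemS S).mpr rfl)
  apply pv_main routes S T (pvFuel routes) (pvFuel routes) [S] 0
    (PySem.Set.ofList [S]) (PySem.Set.ofList [S]) PySem.Set.empty
    (PySem.Set.nodup_ofList [S]) (PySem.Set.nodup_ofList [S])
    (fun x => Iff.rfl)
    (fun hT => by simpa using (hmemS T).mp hT)
    (fun x hx => (hmemS x).mpr (by simpa using hx))
    (fun b x _ hxs hxF => absurd (by simpa using (hmemS x).mp hxs) hxF)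
    (fun b hb => by simp [PySem.Set.empty] at hb)
    (fun x hx => Or.inl ((hmemS x).mp hx))
    (by simp only [List.length_cons, List.length_nil]; omega)
    (by omega)
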